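-- pv_equiv track=rewrite | github.com/StanislawPodr/podrecki-palys-python | lab2/src/proper_names_in_sentences.py | has_proper_name
-- ===== SOURCE A (Python) =====
-- def has_proper_name(sentence):
--     chrIdx = 0
--     # pomijamy pierwszy wyraz
--     while chrIdx < len(sentence) and sentence[chrIdx].isspace():
--         chrIdx += 1
--     while chrIdx < len(sentence) and not sentence[chrIdx].isspace():
--         chrIdx += 1
--
--     # szukamy wyrazu zaczynającego się od wielkiej litery
--     while chrIdx < len(sentence):
--         while chrIdx < len(sentence) and sentence[chrIdx].isspace():
--             chrIdx += 1
--         if chrIdx < len(sentence) and sentence[chrIdx].isupper():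
--             return True
--         while chrIdx < len(sentence) and not sentence[chrIdx].isspace():
--             chrIdx += 1
--     return False
-- ===== SOURCE B (Python) =====
-- def has_proper_name(sentence):
--     words = sentence.split()
--     return any(w[0].isupper() for w in words[1:])
-- ===== Notes on version B (the rewrite author's own statement) =====
-- stated objective: idiomatic
-- what changed: Replaces the manual three-phase index-based character scanner with str.split() tokenization followed by any() over the first characters of the words after the first.
import Mathlib
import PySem

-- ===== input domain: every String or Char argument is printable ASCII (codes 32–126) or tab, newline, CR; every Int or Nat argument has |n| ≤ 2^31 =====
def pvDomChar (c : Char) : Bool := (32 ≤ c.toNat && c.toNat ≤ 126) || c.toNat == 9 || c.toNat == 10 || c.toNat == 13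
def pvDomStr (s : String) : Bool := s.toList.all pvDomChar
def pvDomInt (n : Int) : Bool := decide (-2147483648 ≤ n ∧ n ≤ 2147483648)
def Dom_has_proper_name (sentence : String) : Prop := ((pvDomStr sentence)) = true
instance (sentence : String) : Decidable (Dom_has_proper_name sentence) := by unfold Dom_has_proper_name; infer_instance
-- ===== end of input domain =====

-- B replaces A's manual three-phase index scanner with split()-then-any over word heads (idiomatic decomposition, same cost).

-- ===== PORT A =====
-- A advances an index chrIdx through the string; the port consumes the suffix
-- of the character list instead: each 'while' becomes one structural recursion
-- over the same remaining characters, in the same order.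

-- 'while chrIdx < len(sentence) and sentence[chrIdx].isspace(): chrIdx += 1'
def pvSkipSpace : List Char → List Char
  | [] => []
  | c :: rest => if PySem.Chars.isspace c then pvSkipSpace rest else c :: rest

-- 'while chrIdx < len(sentence) and not sentence[chrIdx].isspace(): chrIdx += 1'
def pvSkipWord : List Char → List Char
  | [] => []
  | c :: rest => if PySem.Chars.isspace c then c :: rest else pvSkipWord rest

theorem pvSkipSpace_length_le (cs : List Char) : (pvSkipSpace cs).length ≤ cs.length := by
  induction cs with
  | nil => simp [pvSkipSpace]
  | cons c rest ih => simp only [pvSkipSpace]; split <;> simp_all <;> omega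

theorem pvSkipWord_length_le (cs : List Char) : (pvSkipWord cs).length ≤ cs.length := by
  induction cs with
  | nil => simp [pvSkipWord]
  | cons c rest ih => simp only [pvSkipWord]; split <;> simp_all <;> omega

-- the outer 'while chrIdx < len(sentence): …' loop of A
def pvALoop (cs : List Char) : Bool :=
  match _h : pvSkipSpace cs with
  | [] => false
  | c :: rest =>
    if PySem.Chars.isupper c then true else pvALoop (pvSkipWord rest)
termination_by cs.length
decreasing_by
  have h1 := pvSkipSpace_length_le cs
  have h2 := pvSkipWord_length_le rest
  rw [_h] at h1
  simp at h1
  omega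

def has_proper_name (sentence : String) : Bool :=
  pvALoop (pvSkipWord (pvSkipSpace sentence.toList))

-- ===== PORT B =====
-- w[0].isupper() (split() words are never empty, so the default is never read)
def pvStartsUpper (w : List Char) : Bool := PySem.Chars.isupper (w.headD ' ')

def has_proper_name_alt (sentence : String) : Bool :=
  ((PySem.Chars.split₀ sentence.toList).drop 1).any pvStartsUpper

-- ===== PRECONDITION & SPEC =====
def Spec_has_proper_name (sentence : String) (out : Bool) : Prop := out = has_proper_name_alt sentence
instance (sentence : String) (out : Bool) : Decidable (Spec_has_proper_name sentence out) := by unfold Spec_has_proper_name; infer_instance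

-- ===== CLAIM (what is proved, stated in full; the proofs are below) =====
def Claim_equal_has_proper_name : Prop := ∀ (sentence : String), Dom_has_proper_name sentence → Spec_has_proper_name sentence (has_proper_name sentence)

-- ===== LEMMAS AND PROOFS =====

-- the shared shape both programs compute over: the list of whitespace-separated words
def pvWordsOf (cs : List Char) : List (List Char) :=
  let t := cs.dropWhile PySem.Chars.isspace
  if _ht : t = [] then []
  else t.takeWhile (fun d => !PySem.Chars.isspace d)
        :: pvWordsOf (t.dropWhile (fun d => !PySem.Chars.isspace d))
termination_by cs.length
decreasing_by
  have h1 : (cs.dropWhile PySem.Chars.isspace).length ≤ cs.length :=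
    List.length_dropWhile_le _ _
  obtain ⟨c, rest, hcr⟩ := List.exists_cons_of_ne_nil _ht
  have hcr' : cs.dropWhile PySem.Chars.isspace = c :: rest := hcr
  have hc : PySem.Chars.isspace c = false := by
    have := List.head?_dropWhile_not PySem.Chars.isspace cs
    rw [hcr'] at this; simpa using this
  have h2 : ((cs.dropWhile PySem.Chars.isspace).dropWhile (fun d => !PySem.Chars.isspace d)).length ≤ rest.length := by
    rw [hcr', List.dropWhile_cons]
    simp only [hc, Bool.not_false, if_true]
    exact List.length_dropWhile_le _ _
  rw [hcr'] at h1
  simp only [List.length_cons] at h1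
  omega

theorem pvWordsOf_nil_of (cs : List Char) (h : cs.dropWhile PySem.Chars.isspace = []) :
    pvWordsOf cs = [] := by
  rw [pvWordsOf.eq_1]; simp [h]

theorem pvWordsOf_cons_of (cs : List Char) (c : Char) (rest : List Char)
    (h : cs.dropWhile PySem.Chars.isspace = c :: rest) :
    pvWordsOf cs =
      (c :: rest).takeWhile (fun d => !PySem.Chars.isspace d)
        :: pvWordsOf ((c :: rest).dropWhile (fun d => !PySem.Chars.isspace d)) := by
  rw [pvWordsOf.eq_1]; simp [h]

theorem pvWordsOf_cons_space (c : Char) (rest : List Char) (hc : PySem.Chars.isspace c = true) :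
    pvWordsOf (c :: rest) = pvWordsOf rest := by
  conv_lhs => rw [pvWordsOf.eq_1]
  conv_rhs => rw [pvWordsOf.eq_1]
  simp only [List.dropWhile_cons, hc, if_true]

theorem pvSkipSpace_eq (cs : List Char) :
    pvSkipSpace cs = cs.dropWhile PySem.Chars.isspace := by
  induction cs with
  | nil => simp [pvSkipSpace]
  | cons c rest ih => simp only [pvSkipSpace, List.dropWhile_cons]; split <;> simp_all

theorem pvSkipWord_eq (cs : List Char) :
    pvSkipWord cs = cs.dropWhile (fun d => !PySem.Chars.isspace d) := by
  induction cs with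
  | nil => simp [pvSkipWord]
  | cons c rest ih =>
    simp only [pvSkipWord, List.dropWhile_cons]
    by_cases hc : PySem.Chars.isspace c <;> simp [hc, ih]

theorem pvSplitGo_spec (cs cur : List Char) (acc : List (List Char)) :
    PySem.Chars.split₀.go cs cur acc =
      acc.reverse ++
        (if cur = [] then pvWordsOf cs
         else (cur.reverse ++ cs.takeWhile (fun d => !PySem.Chars.isspace d))
                :: pvWordsOf (cs.dropWhile (fun d => !PySem.Chars.isspace d))) := by
  induction cs generalizing cur acc with
  | nil =>
    by_cases hcur : cur = [] <;>
      simp [PySem.Chars.split₀.go, hcur, pvWordsOf_nil_of [] (by simp)]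
  | cons c rest ih =>
    by_cases hc : PySem.Chars.isspace c
    · by_cases hcur : cur = []
      · simp only [PySem.Chars.split₀.go, hcur, List.isEmpty_nil, if_true, hc, if_pos]
        rw [ih, pvWordsOf_cons_space c rest hc]
        simp
      · have : cur.isEmpty = false := by simpa [List.isEmpty_iff] using hcur
        simp only [PySem.Chars.split₀.go, this, Bool.false_eq_true, if_false, hc, if_true]
        rw [ih]
        simp [hcur, List.takeWhile_cons, List.dropWhile_cons, hc,
          pvWordsOf_cons_space c rest hc]
    · have hcb : PySem.Chars.isspace c = false := by simpa using hc
      simp only [PySem.Chars.split₀.go, hcb, Bool.false_eq_true, if_false]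
      rw [ih]
      rw [pvWordsOf_cons_of (c :: rest) c rest (by simp [List.dropWhile_cons, hcb])]
      by_cases hcur : cur = [] <;>
        simp [hcur, List.takeWhile_cons, List.dropWhile_cons, hcb]

theorem pvSplit₀_eq_wordsOf (cs : List Char) :
    PySem.Chars.split₀ cs = pvWordsOf cs := by
  simpa using pvSplitGo_spec cs [] []

theorem pvALoop_eq (cs : List Char) :
    pvALoop cs = (pvWordsOf cs).any pvStartsUpper := by
  induction cs using pvALoop.induct with
  | case1 cs h =>
    have hd : cs.dropWhile PySem.Chars.isspace = [] := by rw [← pvSkipSpace_eq]; exact h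
    rw [pvALoop]
    split
    · simp [pvWordsOf_nil_of cs hd]
    · next c rest heq => rw [h] at heq; cases heq
  | case2 cs c rest h hup =>
    have hd : cs.dropWhile PySem.Chars.isspace = c :: rest := by rw [← pvSkipSpace_eq]; exact h
    have hc : PySem.Chars.isspace c = false := by
      have := List.head?_dropWhile_not PySem.Chars.isspace cs
      rw [hd] at this; simpa using this
    rw [pvALoop]
    split
    · next heq => rw [h] at heq; cases heq
    · next c' rest' heq =>
      rw [h] at heq
      injection heq with h1 h2
      subst h1; subst h2
      rw [pvWordsOf_cons_of cs c rest hd]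
      simp [hup, List.takeWhile_cons, hc, pvStartsUpper]
  | case3 cs c rest h hup ih =>
    have hd : cs.dropWhile PySem.Chars.isspace = c :: rest := by rw [← pvSkipSpace_eq]; exact h
    have hc : PySem.Chars.isspace c = false := by
      have := List.head?_dropWhile_not PySem.Chars.isspace cs
      rw [hd] at this; simpa using this
    rw [pvALoop]
    split
    · next heq => rw [h] at heq; cases heq
    · next c' rest' heq =>
      rw [h] at heq
      injection heq with h1 h2
      subst h1; subst h2
      rw [pvWordsOf_cons_of cs c rest hd]
      simp only [List.any_cons]
      rw [ih, pvSkipWord_eq]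
      simp [List.takeWhile_cons, List.dropWhile_cons, hc, pvStartsUpper, hup]

-- ===== VERDICT (by name: the statement is the Claim_ definition above) =====
theorem has_proper_name_spec : Claim_equal_has_proper_name := by
  intro s _
  unfold Spec_has_proper_name has_proper_name has_proper_name_alt
  rw [pvSplit₀_eq_wordsOf, pvALoop_eq, pvSkipSpace_eq, pvSkipWord_eq]
  rcases h : (s.toList).dropWhile PySem.Chars.isspace with _ | ⟨c, rest⟩
  · simp [pvWordsOf_nil_of s.toList h, pvWordsOf_nil_of ([] : List Char) (by simp)]
  · rw [pvWordsOf_cons_of s.toList c rest h]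
    simp
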